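-- pv_equiv track=rewrite | github.com/TUDONG05/PythonBasic | day8/baitap2.py | checkAZ
-- ===== SOURCE A (Python) =====
-- def checkAZ(string):
--     letter=False
--     number=False
--
--     for i in string:
--         if 'a' <= i <= 'z':
--             letter=True
--         elif '0' <= i <= '9':
--             number =True
--         else:
--             return False
--     return len(string) >=6 and letter and number
-- ===== SOURCE B (Python) =====
-- def checkAZ(string):
--     lowers = set("abcdefghijklmnopqrstuvwxyz")
--     digits = set("0123456789")
--     valid = lowers | digits
--     return (len(string) >= 6
--             and all(c in valid for c in string)
--             and any(c in lowers for c in string)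
--             and any(c in digits for c in string))
-- ===== Notes on version B (the rewrite author's own statement) =====
-- stated objective: idiomatic
-- what changed: Replaced the single flag-accumulating loop with early return by a declarative formulation: one all() membership scan over a valid-character set plus two any() scans for the lowercase-letter and digit requirements.
import Mathlib
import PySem

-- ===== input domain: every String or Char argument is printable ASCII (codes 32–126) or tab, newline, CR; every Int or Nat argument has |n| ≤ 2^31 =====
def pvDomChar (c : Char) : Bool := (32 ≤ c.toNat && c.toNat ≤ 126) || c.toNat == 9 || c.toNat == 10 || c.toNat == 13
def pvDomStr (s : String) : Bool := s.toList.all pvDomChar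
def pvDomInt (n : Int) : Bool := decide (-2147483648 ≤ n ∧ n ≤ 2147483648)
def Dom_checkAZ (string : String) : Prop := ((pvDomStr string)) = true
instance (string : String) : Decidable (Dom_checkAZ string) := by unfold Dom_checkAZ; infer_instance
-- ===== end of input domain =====

-- B replaces A's single flag-accumulating loop (with early return) by an idiomatic
-- all/any formulation over explicit ASCII character sets; same O(n) cost.

-- ===== PORT A =====
-- A's for-loop: carries the letter/number flags; `none` models the early `return False`
def checkAZGo : List Char → Bool → Bool → Option (Bool × Bool)
  | [], letter, number => some (letter, number)
  | i :: rest, letter, number =>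
    if 'a' ≤ i ∧ i ≤ 'z' then checkAZGo rest true number
    else if '0' ≤ i ∧ i ≤ '9' then checkAZGo rest letter true
    else none

def checkAZ (string : String) : Bool :=
  match checkAZGo string.toList false false with
  | none => false
  | some (letter, number) => decide (6 ≤ PySem.Str.len string) && letter && number

-- ===== PORT B =====
def checkAZLowers : PySem.Set Char :=
  PySem.Set.ofList ['a','b','c','d','e','f','g','h','i','j','k','l','m','n','o','p','q','r','s','t','u','v','w','x','y','z']
def checkAZDigits : PySem.Set Char :=
  PySem.Set.ofList ['0','1','2','3','4','5','6','7','8','9']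
def checkAZValid : PySem.Set Char := PySem.Set.union checkAZLowers checkAZDigits

def checkAZ_alt (string : String) : Bool :=
  decide (6 ≤ PySem.Str.len string)
    && string.toList.all (fun c => PySem.Set.contains checkAZValid c)
    && string.toList.any (fun c => PySem.Set.contains checkAZLowers c)
    && string.toList.any (fun c => PySem.Set.contains checkAZDigits c)

-- ===== PRECONDITION & SPEC =====
def Spec_checkAZ (string : String) (out : Bool) : Prop := out = checkAZ_alt string
instance (string : String) (out : Bool) : Decidable (Spec_checkAZ string out) := by unfold Spec_checkAZ; infer_instance

-- ===== CLAIM (what is proved, stated in full; the proofs are below) =====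
def Claim_equal_checkAZ : Prop := ∀ (string : String), Dom_checkAZ string → Spec_checkAZ string (checkAZ string)

-- ===== LEMMAS AND PROOFS =====

def pvIsLower (c : Char) : Bool := decide ('a' ≤ c ∧ c ≤ 'z')
def pvIsDigit (c : Char) : Bool := decide ('0' ≤ c ∧ c ≤ '9')

lemma contains_lowers (c : Char) : PySem.Set.contains checkAZLowers c = pvIsLower c := by
  have h : checkAZLowers = ['a','b','c','d','e','f','g','h','i','j','k','l','m','n','o','p','q','r','s','t','u','v','w','x','y','z'] := by decide
  rw [PySem.Set.contains, h, List.contains_eq_mem, pvIsLower, decide_eq_decide]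
  simp only [List.mem_cons, List.not_mem_nil, or_false, Char.le_def, Char.ext_iff]
  constructor
  · intro hm
    rcases hm with h|h|h|h|h|h|h|h|h|h|h|h|h|h|h|h|h|h|h|h|h|h|h|h|h|h <;> rw [h] <;>
      exact ⟨by decide, by decide⟩
  · rintro ⟨h1, h2⟩
    have h1' : 97 ≤ c.val.toNat := h1
    have h2' : c.val.toNat ≤ 122 := h2
    interval_cases h : c.val.toNat <;> simp [← UInt32.toNat_inj, h]

lemma contains_digits (c : Char) : PySem.Set.contains checkAZDigits c = pvIsDigit c := by
  have h : checkAZDigits = ['0','1','2','3','4','5','6','7','8','9'] := by decide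
  rw [PySem.Set.contains, h, List.contains_eq_mem, pvIsDigit, decide_eq_decide]
  simp only [List.mem_cons, List.not_mem_nil, or_false, Char.le_def, Char.ext_iff]
  constructor
  · intro hm
    rcases hm with h|h|h|h|h|h|h|h|h|h <;> rw [h] <;> exact ⟨by decide, by decide⟩
  · rintro ⟨h1, h2⟩
    have h1' : 48 ≤ c.val.toNat := h1
    have h2' : c.val.toNat ≤ 57 := h2
    interval_cases h : c.val.toNat <;> simp [← UInt32.toNat_inj, h]

lemma contains_valid (c : Char) :
    PySem.Set.contains checkAZValid c = (pvIsLower c || pvIsDigit c) := by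
  have h : checkAZValid = (['a','b','c','d','e','f','g','h','i','j','k','l','m','n','o','p','q','r','s','t','u','v','w','x','y','z'] ++ ['0','1','2','3','4','5','6','7','8','9']) := by decide
  rw [PySem.Set.contains, h, List.contains_eq_mem]
  have hl := contains_lowers c
  have hd := contains_digits c
  rw [PySem.Set.contains, List.contains_eq_mem] at hl hd
  have hL : checkAZLowers = ['a','b','c','d','e','f','g','h','i','j','k','l','m','n','o','p','q','r','s','t','u','v','w','x','y','z'] := by decide
  have hD : checkAZDigits = ['0','1','2','3','4','5','6','7','8','9'] := by decide
  rw [hL] at hl; rw [hD] at hd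
  rw [← hl, ← hd, ← Bool.decide_or, decide_eq_decide]
  exact List.mem_append

lemma checkAZGo_eq (cs : List Char) : ∀ (l n : Bool),
    checkAZGo cs l n =
      if cs.all (fun c => pvIsLower c || pvIsDigit c)
      then some (l || cs.any pvIsLower, n || cs.any pvIsDigit)
      else none := by
  induction cs with
  | nil => intro l n; simp [checkAZGo]
  | cons c cs ih =>
    intro l n
    by_cases h1 : 'a' ≤ c ∧ c ≤ 'z'
    · have hnd : ¬('0' ≤ c ∧ c ≤ '9') := fun hh => absurd (le_trans h1.1 hh.2) (by decide)
      rw [checkAZGo, if_pos h1, ih]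
      by_cases hc : (cs.all fun x => pvIsLower x || pvIsDigit x) = true
      · simp [hc, pvIsLower, pvIsDigit, h1, hnd]
      · simp only [Bool.not_eq_true] at hc
        simp [hc, pvIsLower, pvIsDigit, h1, hnd]
    · by_cases h2 : '0' ≤ c ∧ c ≤ '9'
      · rw [checkAZGo, if_neg h1, if_pos h2, ih]
        by_cases hc : (cs.all fun x => pvIsLower x || pvIsDigit x) = true
        · simp [hc, pvIsLower, pvIsDigit, h1, h2]
        · simp only [Bool.not_eq_true] at hc
          simp [hc, pvIsLower, pvIsDigit, h1, h2]
      · rw [checkAZGo, if_neg h1, if_neg h2]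
        simp [pvIsLower, pvIsDigit, h1, h2]

-- ===== VERDICT (by name: the statement is the Claim_ definition above) =====
theorem checkAZ_spec : Claim_equal_checkAZ := by
  intro s _
  show checkAZ s = checkAZ_alt s
  unfold checkAZ checkAZ_alt
  have hv : (fun c => PySem.Set.contains checkAZValid c)
      = (fun c => pvIsLower c || pvIsDigit c) := funext contains_valid
  have hl : (fun c => PySem.Set.contains checkAZLowers c) = pvIsLower := funext contains_lowers
  have hd : (fun c => PySem.Set.contains checkAZDigits c) = pvIsDigit := funext contains_digits
  rw [hv, hl, hd, checkAZGo_eq]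
  by_cases hall : s.toList.all (fun c => pvIsLower c || pvIsDigit c)
  · simp only [if_pos hall, hall, Bool.false_or, Bool.and_true]
    cases decide (6 ≤ PySem.Str.len s) <;>
      cases s.toList.any pvIsLower <;> cases s.toList.any pvIsDigit <;> rfl
  · simp only [if_neg hall]
    simp only [Bool.not_eq_true] at hall
    rw [hall]
    simp
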